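-- pv_equiv track=rewrite | github.com/hippohop/plugin.video.example | main.py | filter_links
-- ===== SOURCE A (Python) =====
-- def filter_links(links):
--     priority = [
--         ("2160p", "cz", "dabing"),
--         ("2160p", "cz"),
--         ("1080p", "cz", "dabing"),
--         ("1080p", "cz"),
--         ("720p", "cz", "dabing"),
--         ("720p", "cz"),
--         ("cz",),
--         ()
--     ]
--     for tags in priority:
--         match = [l for l in links if all(t in l[1].lower() for t in tags)]
--         if match:
--             return match
--     return []
-- ===== SOURCE B (Python) =====
-- PRIORITY = [
--     ("2160p", "cz", "dabing"),
--     ("2160p", "cz"),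
--     ("1080p", "cz", "dabing"),
--     ("1080p", "cz"),
--     ("720p", "cz", "dabing"),
--     ("720p", "cz"),
--     ("cz",),
--     (),
-- ]
--
--
-- def _best(link):
--     s = link[1].lower()
--     for i, tags in enumerate(PRIORITY):
--         if all(t in s for t in tags):
--             return i
--     return len(PRIORITY)  # unreachable: the empty tier matches everything
--
--
-- def filter_links(links):
--     # One pass over links: keep the running best (lowest) tier index and
--     # the links achieving it, in input order.
--     best_tier = len(PRIORITY)
--     acc = []
--     for l in links:
--         b = _best(l)
--         if b < best_tier:
--             best_tier = b
--             acc = [l]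
--         elif b == best_tier:
--             acc.append(l)
--     return acc
-- ===== Notes on version B (the rewrite author's own statement) =====
-- stated objective: alternative
-- what changed: Instead of scanning all links once per priority tier and returning the first nonempty match list, B makes one pass over the links, computing each link's best (lowest) tier index and keeping the running minimum tier together with the links that achieve it, in input order.
import Mathlib
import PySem

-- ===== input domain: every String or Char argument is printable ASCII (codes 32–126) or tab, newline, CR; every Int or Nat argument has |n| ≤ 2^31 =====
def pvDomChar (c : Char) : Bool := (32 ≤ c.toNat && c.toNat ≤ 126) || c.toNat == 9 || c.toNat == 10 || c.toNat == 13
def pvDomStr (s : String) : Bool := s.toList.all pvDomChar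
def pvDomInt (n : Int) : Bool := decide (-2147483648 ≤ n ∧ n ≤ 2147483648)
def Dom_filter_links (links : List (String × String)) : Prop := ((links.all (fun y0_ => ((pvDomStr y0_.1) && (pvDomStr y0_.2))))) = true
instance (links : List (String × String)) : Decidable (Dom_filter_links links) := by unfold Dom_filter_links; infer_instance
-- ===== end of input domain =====

-- B re-implements A's tier-by-tier rescans as one pass over the links tracking the
-- running minimum best-tier index and its links; same cost class, different traversal.

-- shared constant (the `priority` table) and tag test `all(t in l[1].lower() for t in tags)`
def pvTiers : List (List String) :=
  [["2160p", "cz", "dabing"], ["2160p", "cz"], ["1080p", "cz", "dabing"], ["1080p", "cz"],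
   ["720p", "cz", "dabing"], ["720p", "cz"], ["cz"], []]

def pvMatch (tags : List String) (l : String × String) : Bool :=
  tags.all (fun t => PySem.Str.isIn t (PySem.Str.lower l.2))

-- ===== PORT A =====
-- `for tags in priority: match = [l for l in links if …]; if match: return match` / `return []`
def pvGoA (links : List (String × String)) : List (List String) → List (String × String)
  | [] => []
  | tags :: rest =>
    let m := links.filter (fun l => pvMatch tags l)
    if m.isEmpty then pvGoA links rest else m

def filter_links (links : List (String × String)) : List (String × String) :=
  pvGoA links pvTiers

-- ===== PORT B =====
-- `_best`: first tier index matching the link (len(PRIORITY) if none — unreachable in use)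
def pvBest (l : String × String) : Nat :=
  List.findIdx (fun tags => pvMatch tags l) pvTiers

-- the single pass: running minimum tier T and the links achieving it, in order
def pvLoop : Nat → List (String × String) → List (String × String) → Nat × List (String × String)
  | T, acc, [] => (T, acc)
  | T, acc, l :: rest =>
    let b := pvBest l
    if b < T then pvLoop b [l] rest
    else if b = T then pvLoop T (acc ++ [l]) rest
    else pvLoop T acc rest

def filter_links_alt (links : List (String × String)) : List (String × String) :=
  (pvLoop pvTiers.length [] links).2

-- ===== PRECONDITION & SPEC =====
def Spec_filter_links (links : List (String × String)) (out : List (String × String)) : Prop := out = filter_links_alt links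
instance (links : List (String × String)) (out : List (String × String)) : Decidable (Spec_filter_links links out) := by unfold Spec_filter_links; infer_instance

-- ===== CLAIM (what is proved, stated in full; the proofs are below) =====
def Claim_equal_filter_links : Prop := ∀ (links : List (String × String)), Dom_filter_links links → Spec_filter_links links (filter_links links)

-- ===== LEMMAS AND PROOFS =====

-- proof-only helpers: best tier index relative to a tier suffix, and its minimum over links
def pvIdx (ts : List (List String)) (l : String × String) : Nat :=
  List.findIdx (fun tags => pvMatch tags l) ts

def pvMinIdx (ts : List (List String)) (links : List (String × String)) : Nat :=
  (links.map (pvIdx ts)).foldr min ts.length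

lemma pvFoldrMin_le_mem {xs : List Nat} {b a : Nat} (h : a ∈ xs) : xs.foldr min b ≤ a := by
  induction xs with
  | nil => cases h
  | cons x xs ih =>
    rcases List.mem_cons.1 h with rfl | h'
    · exact min_le_left _ _
    · exact le_trans (min_le_right _ _) (ih h')

lemma pvFoldrMin_shift (xs : List Nat) (b : Nat) :
    (xs.map (· + 1)).foldr min (b + 1) = xs.foldr min b + 1 := by
  induction xs with
  | nil => rfl
  | cons x xs ih => simp only [List.map_cons, List.foldr_cons, ih]; omega

lemma pvGoA_char (ts : List (List String)) (links : List (String × String)) :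
    pvGoA links ts =
      if pvMinIdx ts links < ts.length then
        links.filter (fun l => pvIdx ts l == pvMinIdx ts links)
      else [] := by
  induction ts with
  | nil => simp [pvGoA]
  | cons tags rest ih =>
    by_cases hm : ∀ l ∈ links, pvMatch tags l = false
    · have hfilter : links.filter (fun l => pvMatch tags l) = [] :=
        List.filter_eq_nil_iff.mpr (by intro a ha; simp [hm a ha])
      have hidx : ∀ l ∈ links, pvIdx (tags :: rest) l = pvIdx rest l + 1 := by
        intro l hl; simp [pvIdx, List.findIdx_cons, hm l hl]
      have hmap : links.map (pvIdx (tags :: rest)) = (links.map (pvIdx rest)).map (· + 1) := by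
        rw [List.map_map]
        exact List.map_congr_left (fun l hl => hidx l hl)
      have hMB : pvMinIdx (tags :: rest) links = pvMinIdx rest links + 1 := by
        unfold pvMinIdx
        rw [hmap, List.length_cons, pvFoldrMin_shift]
      simp only [pvGoA, hfilter, List.isEmpty_nil, if_pos, ih]
      by_cases hc : pvMinIdx rest links < rest.length
      · rw [if_pos hc, if_pos (by rw [hMB, List.length_cons]; omega)]
        refine List.filter_congr ?_
        intro l hl
        rw [hidx l hl, hMB, Bool.eq_iff_iff]
        simp
      · rw [if_neg hc, if_neg (by rw [hMB, List.length_cons]; omega)]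
    · push Not at hm
      obtain ⟨l0, hl0, hp0⟩ := hm
      have hp0' : pvMatch tags l0 = true := by
        cases h : pvMatch tags l0
        · exact absurd h hp0
        · rfl
      have hMB0 : pvMinIdx (tags :: rest) links = 0 := by
        have hidx0 : pvIdx (tags :: rest) l0 = 0 := by
          simp [pvIdx, List.findIdx_cons, hp0']
        have hmem : (0 : Nat) ∈ links.map (pvIdx (tags :: rest)) := by
          rw [← hidx0]; exact List.mem_map_of_mem hl0
        have := pvFoldrMin_le_mem (b := (tags :: rest).length) hmem
        unfold pvMinIdx
        omega
      have hne : (links.filter (fun l => pvMatch tags l)).isEmpty = false := by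
        rw [List.isEmpty_eq_false_iff_exists_mem]
        exact ⟨l0, List.mem_filter.mpr ⟨hl0, hp0'⟩⟩
      simp only [pvGoA, hne, Bool.false_eq_true, if_false]
      rw [hMB0, if_pos (by simp)]
      refine List.filter_congr ?_
      intro l _
      rw [Bool.eq_iff_iff]
      cases h : pvMatch tags l <;> simp [pvIdx, List.findIdx_cons, h]

lemma pvMatch_nil (l : String × String) : pvMatch [] l = true := rfl

lemma pvBest_lt (l : String × String) : pvBest l < pvTiers.length := by
  have : pvMatch [] l = true := pvMatch_nil l
  refine List.findIdx_lt_length_of_exists ⟨[], ?_, this⟩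
  simp [pvTiers]

lemma pvBest_eq_pvIdx (l : String × String) : pvIdx pvTiers l = pvBest l := rfl

lemma pvMinIdx_cons (l : String × String) (rest : List (String × String)) :
    pvMinIdx pvTiers (l :: rest) = min (pvBest l) (pvMinIdx pvTiers rest) := by
  simp [pvMinIdx, pvBest_eq_pvIdx]

lemma pvLoop_spec (rest : List (String × String)) :
    ∀ (T : Nat) (acc : List (String × String)), T ≤ pvTiers.length →
      pvLoop T acc rest =
        if pvMinIdx pvTiers rest < T then
          (pvMinIdx pvTiers rest, rest.filter (fun l => pvBest l == pvMinIdx pvTiers rest))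
        else (T, acc ++ rest.filter (fun l => pvBest l == T)) := by
  induction rest with
  | nil =>
    intro T acc hT
    have h8 : pvMinIdx pvTiers ([] : List (String × String)) = pvTiers.length := rfl
    rw [if_neg (by omega)]
    simp [pvLoop]
  | cons l rest ih =>
    intro T acc hT
    have hb8 : pvBest l < pvTiers.length := pvBest_lt l
    have hmb : pvMinIdx pvTiers (l :: rest) = min (pvBest l) (pvMinIdx pvTiers rest) :=
      pvMinIdx_cons l rest
    simp only [pvLoop]
    by_cases h1 : pvBest l < T
    · rw [if_pos h1, ih (pvBest l) [l] (by omega)]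
      by_cases h2 : pvMinIdx pvTiers rest < pvBest l
      · rw [if_pos h2, if_pos (by omega), hmb, Nat.min_eq_right (le_of_lt h2),
          List.filter_cons_of_neg (by simp; omega)]
      · rw [if_neg h2, hmb, Nat.min_eq_left (by omega), if_pos h1,
          List.filter_cons_of_pos (by simp)]
        rfl
    · rw [if_neg h1]
      by_cases heq : pvBest l = T
      · rw [if_pos heq, ih T (acc ++ [l]) hT]
        by_cases h2 : pvMinIdx pvTiers rest < T
        · rw [if_pos h2, if_pos (by omega), hmb, Nat.min_eq_right (by omega),
            List.filter_cons_of_neg (by simp; omega)]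
        · rw [if_neg h2, if_neg (by rw [hmb]; omega),
            List.filter_cons_of_pos (by simp [heq]), List.append_assoc]
          rfl
      · rw [if_neg heq, ih T acc hT]
        by_cases h2 : pvMinIdx pvTiers rest < T
        · rw [if_pos h2, if_pos (by rw [hmb]; omega), hmb, Nat.min_eq_right (by omega),
            List.filter_cons_of_neg (by simp; omega)]
        · rw [if_neg h2, if_neg (by rw [hmb]; omega),
            List.filter_cons_of_neg (by simp; omega)]

-- ===== VERDICT (by name: the statement is the Claim_ definition above) =====
theorem filter_links_spec : Claim_equal_filter_links := by
  intro links _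
  unfold Spec_filter_links
  show filter_links links = filter_links_alt links
  unfold filter_links filter_links_alt
  rw [pvGoA_char, pvLoop_spec links pvTiers.length [] (le_refl _)]
  by_cases h : pvMinIdx pvTiers links < pvTiers.length
  · rw [if_pos h, if_pos h]
    simp only [pvBest_eq_pvIdx]
  · rw [if_neg h, if_neg h]
    simp only [List.nil_append]
    symm
    refine List.filter_eq_nil_iff.mpr ?_
    intro l _
    have := pvBest_lt l
    simp only [beq_iff_eq]
    omega
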